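-- pv_equiv track=rewrite | github.com/mmanco/project-socora | scripts/crawler/find_empty_content_md.py | is_effectively_empty_markdown
-- ===== SOURCE A (Python) =====
-- def is_effectively_empty_markdown(md_text: str) -> bool:
--     """Return True if the markdown has no body beyond the front matter.
--
--     Rules:
--     - If the file starts with a front matter block delimited by '---' lines,
--       any non-blank content after the closing '---' counts as a body.
--     - If there is no front matter, any non-blank content anywhere counts as a body.
--     - Lines containing only whitespace are ignored.
--     """
--     lines = md_text.splitlines()
--     i = 0
--     n = len(lines)
--     # Skip initial blank lines
--     while i < n and not lines[i].strip():
--         i += 1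
--
--     # Check for front matter
--     if i < n and lines[i].strip() == "---":
--         i += 1
--         # Find closing '---'
--         while i < n and lines[i].strip() != "---":
--             i += 1
--         if i < n and lines[i].strip() == "---":
--             i += 1  # move past closing delimiter
--         # Skip a single optional blank line after front matter
--         while i < n and not lines[i].strip():
--             i += 1
--         # If nothing but blanks remain, it's empty
--         return i >= n
--     else:
--         # No front matter: any non-blank line means non-empty
--         for line in lines:
--             if line.strip():
--                 return False
--         return True
-- ===== SOURCE B (Python) =====
-- def is_effectively_empty_markdown(md_text: str) -> bool:
--     nb = [l.strip() for l in md_text.splitlines() if l.strip()]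
--     if not nb:
--         return True
--     if nb[0] != '---':
--         return False
--     try:
--         j = nb.index('---', 1)
--     except ValueError:
--         return True
--     return j == len(nb) - 1
-- ===== Notes on version B (the rewrite author's own statement) =====
-- stated objective: simpler
-- what changed: Replaces A's four index-pointer while/for loops over raw lines by first collapsing the text to the list of non-blank stripped lines, then answering with one head check and one list.index lookup for the closing front-matter delimiter.
import Mathlib
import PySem

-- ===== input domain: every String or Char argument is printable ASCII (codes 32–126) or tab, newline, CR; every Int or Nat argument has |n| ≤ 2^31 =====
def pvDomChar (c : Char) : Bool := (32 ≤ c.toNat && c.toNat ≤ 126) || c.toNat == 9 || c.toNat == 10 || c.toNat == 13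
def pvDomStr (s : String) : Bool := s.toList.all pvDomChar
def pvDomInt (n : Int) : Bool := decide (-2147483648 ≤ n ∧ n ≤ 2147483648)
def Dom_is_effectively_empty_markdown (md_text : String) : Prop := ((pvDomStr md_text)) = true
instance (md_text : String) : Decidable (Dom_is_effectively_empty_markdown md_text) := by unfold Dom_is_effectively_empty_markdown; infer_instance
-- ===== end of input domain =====

-- B replaces A's four index-pointer loops over raw lines by one filtered list of
-- non-blank stripped lines plus a single list.index lookup (objective: simpler).

-- ===== PORT A =====
-- while i < n and not lines[i].strip(): i += 1   (structural recursion on the suffix)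
def pvASkipBlank (ls : List String) : List String :=
  match ls with
  | [] => []
  | l :: rest => if PySem.Str.strip l == "" then pvASkipBlank rest else l :: rest

-- while i < n and lines[i].strip() != "---": i += 1
def pvAFind (ls : List String) : List String :=
  match ls with
  | [] => []
  | l :: rest => if PySem.Str.strip l != "---" then pvAFind rest else l :: rest

-- for line in lines: if line.strip(): return False ; return True
def pvAElse (ls : List String) : Bool :=
  match ls with
  | [] => true
  | l :: rest => if PySem.Str.strip l != "" then false else pvAElse rest

def is_effectively_empty_markdown (md_text : String) : Bool :=
  let lines := PySem.Str.splitlines md_text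
  let ls1 := pvASkipBlank lines
  match ls1 with
  | l :: rest =>
    if PySem.Str.strip l == "---" then
      let ls2 := pvAFind rest
      -- if i < n and lines[i].strip() == "---": i += 1
      let ls3 := match ls2 with
        | [] => ([] : List String)
        | l' :: rest' => if PySem.Str.strip l' == "---" then rest' else l' :: rest'
      (pvASkipBlank ls3).isEmpty
    else pvAElse lines
  | [] => pvAElse lines

-- ===== PORT B =====
def is_effectively_empty_markdown_alt (md_text : String) : Bool :=
  let nb := ((PySem.Str.splitlines md_text).filter
              (fun l => !(PySem.Str.strip l == ""))).map PySem.Str.strip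
  match nb with
  | [] => true
  | h :: t =>
    if h != "---" then false
    else
      match PySem.List.index? t "---" with   -- nb.index('---', 1), absolute index j = k + 1
      | none => true
      | some k => decide (k + 1 = nb.length - 1)

-- ===== PRECONDITION & SPEC =====
def Spec_is_effectively_empty_markdown (md_text : String) (out : Bool) : Prop := out = is_effectively_empty_markdown_alt md_text
instance (md_text : String) (out : Bool) : Decidable (Spec_is_effectively_empty_markdown md_text out) := by unfold Spec_is_effectively_empty_markdown; infer_instance

-- ===== CLAIM (what is proved, stated in full; the proofs are below) =====
def Claim_equal_is_effectively_empty_markdown : Prop := ∀ (md_text : String), Dom_is_effectively_empty_markdown md_text → Spec_is_effectively_empty_markdown md_text (is_effectively_empty_markdown md_text)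

-- ===== LEMMAS AND PROOFS =====

-- the list B works on, as a function of the raw lines
def pvNb (ls : List String) : List String :=
  (ls.filter (fun l => !(PySem.Str.strip l == ""))).map PySem.Str.strip

-- A's body with the lets zeta-reduced, as a function of the split lines
def pvA (lines : List String) : Bool :=
  match pvASkipBlank lines with
  | l :: rest =>
    if PySem.Str.strip l == "---" then
      (pvASkipBlank (match pvAFind rest with
        | [] => ([] : List String)
        | l' :: rest' => if PySem.Str.strip l' == "---" then rest' else l' :: rest')).isEmpty
    else pvAElse lines
  | [] => pvAElse lines

-- B's body with the let zeta-reduced, as a function of the split lines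
def pvB (lines : List String) : Bool :=
  match pvNb lines with
  | [] => true
  | h :: t =>
    if h != "---" then false
    else
      match PySem.List.index? t "---" with
      | none => true
      | some k => decide (k + 1 = (pvNb lines).length - 1)

theorem pvA_eq (md_text : String) :
    is_effectively_empty_markdown md_text = pvA (PySem.Str.splitlines md_text) := rfl

theorem pvB_eq (md_text : String) :
    is_effectively_empty_markdown_alt md_text = pvB (PySem.Str.splitlines md_text) := rfl

theorem pvNb_cons_blank {l : String} (h : PySem.Str.strip l = "") (ls : List String) :
    pvNb (l :: ls) = pvNb ls := by
  simp [pvNb, h]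

theorem pvNb_cons_nonblank {l : String} (h : ¬ PySem.Str.strip l = "") (ls : List String) :
    pvNb (l :: ls) = PySem.Str.strip l :: pvNb ls := by
  simp [pvNb, h]

-- skipping blanks does not change the non-blank stripped lines
theorem skipBlank_nil_iff (ls : List String) : pvASkipBlank ls = [] ↔ pvNb ls = [] := by
  induction ls with
  | nil => simp [pvASkipBlank, pvNb]
  | cons l rest ih =>
    by_cases h : PySem.Str.strip l = ""
    · simpa [pvASkipBlank, h, pvNb_cons_blank h] using ih
    · simp [pvASkipBlank, h, pvNb_cons_nonblank h]

theorem skipBlank_cons {ls : List String} {h : String} {t : List String}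
    (hs : pvASkipBlank ls = h :: t) :
    ¬ PySem.Str.strip h = "" ∧ pvNb ls = PySem.Str.strip h :: pvNb t := by
  induction ls with
  | nil => simp [pvASkipBlank] at hs
  | cons l rest ih =>
    by_cases hb : PySem.Str.strip l = ""
    · simp only [pvASkipBlank, hb, beq_self_eq_true, if_true] at hs
      simpa [pvNb_cons_blank hb] using ih hs
    · simp only [pvASkipBlank, beq_iff_eq, hb, if_false] at hs
      cases hs
      exact ⟨hb, pvNb_cons_nonblank hb _⟩

theorem aElse_eq (ls : List String) : pvAElse ls = decide (pvNb ls = []) := by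
  induction ls with
  | nil => simp [pvAElse, pvNb]
  | cons l rest ih =>
    by_cases h : PySem.Str.strip l = ""
    · simpa [pvAElse, h, pvNb_cons_blank h] using ih
    · simp [pvAElse, h, pvNb_cons_nonblank h]

-- characterisation of A's 'find closing ---' loop against B's index? lookup
theorem aFind_spec (ls : List String) :
    (pvAFind ls = [] ∧ PySem.List.index? (pvNb ls) "---" = none) ∨
    (∃ h t k, pvAFind ls = h :: t ∧ PySem.Str.strip h = "---" ∧
      PySem.List.index? (pvNb ls) "---" = some k ∧
      k + 1 + (pvNb t).length = (pvNb ls).length) := by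
  induction ls with
  | nil =>
    left
    exact ⟨rfl, (PySem.List.index?_eq_none_iff _ _).mpr (by simp [pvNb])⟩
  | cons l rest ih =>
    by_cases hd : PySem.Str.strip l = "---"
    · right
      refine ⟨l, rest, 0, ?_, hd, ?_, ?_⟩
      · simp [pvAFind, hd]
      · rw [pvNb_cons_nonblank (by simp [hd]), hd]
        exact PySem.List.index?_cons_self _ _
      · rw [pvNb_cons_nonblank (by simp [hd])]
        simp only [List.length_cons]; omega
    · have hstep : pvAFind (l :: rest) = pvAFind rest := by
        simp [pvAFind, hd]
      by_cases hb : PySem.Str.strip l = ""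
      · rw [hstep, pvNb_cons_blank hb]; exact ih
      · rw [hstep, pvNb_cons_nonblank hb]
        rcases ih with ⟨h1, h2⟩ | ⟨h, t, k, h1, h2, h3, h4⟩
        · left
          refine ⟨h1, ?_⟩
          rw [PySem.List.index?_cons_of_ne _ hd, h2]
          rfl
        · right
          refine ⟨h, t, k + 1, h1, h2, ?_, ?_⟩
          · rw [PySem.List.index?_cons_of_ne _ hd, h3]
            rfl
          · simp only [List.length_cons]; omega

-- ===== VERDICT (by name: the statement is the Claim_ definition above) =====
theorem is_effectively_empty_markdown_spec : Claim_equal_is_effectively_empty_markdown := by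
  intro md_text _
  unfold Spec_is_effectively_empty_markdown
  rw [pvA_eq, pvB_eq]
  set lines := PySem.Str.splitlines md_text with hlines
  clear hlines
  cases hs : pvASkipBlank lines with
  | nil =>
    have hnil : pvNb lines = [] := (skipBlank_nil_iff lines).mp hs
    simp [pvA, pvB, hs, hnil, aElse_eq]
  | cons l rest =>
    obtain ⟨hnb, hnbeq⟩ := skipBlank_cons hs
    by_cases hfm : PySem.Str.strip l = "---"
    · simp only [pvA, pvB, hs, hfm, beq_self_eq_true, if_true, hnbeq, bne_self_eq_false,
        Bool.false_eq_true, if_false]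
      rcases aFind_spec rest with ⟨h1, h2⟩ | ⟨h, t, k, h1, h2, h3, h4⟩
      · rw [h1, h2]
        simp [List.isEmpty_iff, skipBlank_nil_iff, pvNb]
      · rw [h1, h3]
        simp only [h2, beq_self_eq_true, if_true]
        rw [hfm] at hnbeq
        have hlen : (k + 1 = ("---" :: pvNb rest).length - 1) ↔ pvNb t = [] := by
          simp only [List.length_cons]
          constructor
          · intro he
            have : (pvNb t).length = 0 := by omega
            exact List.eq_nil_of_length_eq_zero this
          · intro he; rw [he] at h4; simp at h4; omega
        by_cases hte : pvNb t = []
        · have hemp : pvASkipBlank t = [] := (skipBlank_nil_iff t).mpr hte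
          simp [hemp, hlen.mpr hte]
        · have h1' : pvASkipBlank t ≠ [] := fun he => hte ((skipBlank_nil_iff t).mp he)
          have hne0 : (pvNb t).length ≠ 0 := fun he => hte (List.eq_nil_of_length_eq_zero he)
          have h2' : ¬ k + 1 = (pvNb rest).length := by omega
          simp [h1', h2']
    · simp only [pvA, pvB, hs, beq_iff_eq, hfm, if_false, aElse_eq, hnbeq]
      have : (PySem.Str.strip l != "---") = true := by simp [hfm]
      simp [this]
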